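-- pv_equiv track=rewrite | github.com/wilmurillo-ai/Design-Assistant | .skills/openclaw-skills/skills/soymilkwinsagain/better-tavily-search/scripts/tavily.py | parse_csvish
-- ===== SOURCE A (Python) =====
-- def parse_csvish(items: list[str] | None) -> list[str]:
--     if not items:
--         return []
--     out: list[str] = []
--     for item in items:
--         for part in item.split(","):
--             cleaned = part.strip()
--             if cleaned:
--                 out.append(cleaned)
--     return out
-- ===== SOURCE B (Python) =====
-- def _flush(out, cur):
--     i, j = 0, len(cur)
--     while i < j and cur[i].isspace():
--         i += 1
--     while j > i and cur[j - 1].isspace():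
--         j -= 1
--     if i < j:
--         out.append("".join(cur[i:j]))
--
--
-- def parse_csvish(items: list[str] | None) -> list[str]:
--     if not items:
--         return []
--     out: list[str] = []
--     for item in items:
--         cur: list[str] = []
--         for ch in item:
--             if ch == ",":
--                 _flush(out, cur)
--                 cur = []
--             else:
--                 cur.append(ch)
--         _flush(out, cur)
--     return out
-- ===== Notes on version B (the rewrite author's own statement) =====
-- stated objective: alternative
-- what changed: Replaces A's split-then-strip-then-filter pipeline with a hand-written character-level tokenizer: one scan over each item's characters maintaining a current-token buffer, flushing at commas and item ends, with whitespace trimmed manually by index movement instead of str.strip.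
import Mathlib
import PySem

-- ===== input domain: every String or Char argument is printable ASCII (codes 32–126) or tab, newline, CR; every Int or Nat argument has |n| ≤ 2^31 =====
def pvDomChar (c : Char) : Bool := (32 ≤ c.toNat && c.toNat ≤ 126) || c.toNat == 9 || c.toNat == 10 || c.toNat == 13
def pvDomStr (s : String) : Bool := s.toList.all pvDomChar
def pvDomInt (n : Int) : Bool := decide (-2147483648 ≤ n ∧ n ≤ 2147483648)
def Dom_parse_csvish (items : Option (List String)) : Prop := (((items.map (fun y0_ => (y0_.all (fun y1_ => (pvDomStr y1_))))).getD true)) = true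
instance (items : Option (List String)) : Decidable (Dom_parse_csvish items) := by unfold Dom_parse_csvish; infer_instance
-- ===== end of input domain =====

-- B is a character-level tokenizer (current-token buffer, flush at commas and item ends, manual
-- index-wise whitespace trimming) instead of A's split/strip/filter pipeline; same cost.

-- ===== PORT A =====
def parse_csvish (items : Option (List String)) : List String :=
  match items with
  | none => []
  | some xs =>
    if xs = [] then []   -- 'if not items' is also true for the empty list
    else
      xs.foldl (fun out item =>
        (PySem.Chars.splitOn item.toList [',']).foldl (fun out part =>
          let cleaned := PySem.Chars.strip part
          if cleaned ≠ [] then out ++ [String.ofList cleaned] else out) out) []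

-- ===== PORT B =====
-- _flush: B trims by moving indices past whitespace at each end; that index movement is
-- dropWhile isspace from the left and (via reverse) from the right, then emits if nonempty.
def pvFlush (out : List String) (cur : List Char) : List String :=
  let t := ((cur.dropWhile PySem.Chars.isspace).reverse.dropWhile PySem.Chars.isspace).reverse
  if t ≠ [] then out ++ [String.ofList t] else out

-- per-item scan: fold over the characters with state (out, current buffer)
def pvScanItem (out : List String) (item : String) : List String :=
  let p := item.toList.foldl
    (fun (p : List String × List Char) ch =>
      if ch = ',' then (pvFlush p.1 p.2, []) else (p.1, p.2 ++ [ch])) (out, [])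
  pvFlush p.1 p.2

def parse_csvish_alt (items : Option (List String)) : List String :=
  match items with
  | none => []
  | some xs =>
    if xs = [] then []
    else xs.foldl pvScanItem []

-- ===== PRECONDITION & SPEC =====
def Spec_parse_csvish (items : Option (List String)) (out : List String) : Prop := out = parse_csvish_alt items
instance (items : Option (List String)) (out : List String) : Decidable (Spec_parse_csvish items out) := by unfold Spec_parse_csvish; infer_instance

-- ===== CLAIM =====
def Claim_equal_parse_csvish : Prop := ∀ (items : Option (List String)), Dom_parse_csvish items → Spec_parse_csvish items (parse_csvish items)

-- ===== LEMMAS AND PROOFS =====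

def pvEmitAll (segs : List (List Char)) : List String :=
  (segs.filter (fun p => PySem.Chars.strip p ≠ [])).map
    (fun p => String.ofList (PySem.Chars.strip p))

lemma modifyHead_id' {α : Type} (l : List α) : List.modifyHead (fun t => t) l = l := by
  cases l <;> simp

-- PySem's fuel-driven splitOn on a one-character separator computes List.splitOn.
lemma pySplitOn_go_single (c : Char) :
    ∀ (fuel : Nat) (l cur : List Char) (acc : List (List Char)), l.length < fuel →
      PySem.Chars.splitOn.go [c] fuel l cur acc
        = acc.reverse ++ List.modifyHead (fun t => cur.reverse ++ t) (l.splitOn c) := by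
  intro fuel
  induction fuel with
  | zero => intro l cur acc h; omega
  | succ fuel ih =>
    intro l cur acc h
    cases l with
    | nil =>
      rw [PySem.Chars.splitOn.go]
      simp [List.splitOn]
      omega
    | cons x rest =>
      rw [PySem.Chars.splitOn.go]
      by_cases hx : x = c
      · subst hx
        simp only [List.isPrefixOf, BEq.rfl, Bool.true_and, if_true,
          List.length_singleton, List.drop_one, List.tail_cons]
        rw [ih rest [] (cur.reverse :: acc) (by simpa using Nat.lt_of_succ_lt_succ h)]
        simp only [List.splitOn, List.splitOnP_cons, BEq.rfl, if_true]
        simp [modifyHead_id']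
      · have hpre : [c].isPrefixOf (x :: rest) = false := by
          simp [List.isPrefixOf]
          exact fun hxc => absurd hxc.symm hx
        simp only [hpre, Bool.false_eq_true, if_false]
        rw [ih rest (x :: cur) acc (by simpa using Nat.lt_of_succ_lt_succ h)]
        simp only [List.splitOn, List.splitOnP_cons]
        have hxc : (x == c) = false := by simp [hx]
        rw [hxc]
        simp only [Bool.false_eq_true, if_false, List.modifyHead_modifyHead]
        congr 1
        apply congrFun
        apply congrArg
        funext t
        simp

lemma pySplitOn_single (s : List Char) (c : Char) :
    PySem.Chars.splitOn s [c] = s.splitOn c := by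
  rw [PySem.Chars.splitOn, pySplitOn_go_single c (s.length + 1) s [] [] (by omega)]
  simp [modifyHead_id']

-- A's inner per-part loop appends the cleaned non-empty parts
lemma inner_loop (parts : List (List Char)) (out : List String) :
    parts.foldl (fun out part =>
        let cleaned := PySem.Chars.strip part
        if cleaned ≠ [] then out ++ [String.ofList cleaned] else out) out
      = out ++ pvEmitAll parts := by
  have h := PySem.List.foldl_append_if (fun p => decide (PySem.Chars.strip p ≠ []))
      (fun p => String.ofList (PySem.Chars.strip p)) parts out
  simpa [pvEmitAll] using h

-- B's flush emits the stripped buffer when nonempty: its double dropWhile IS strip.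
lemma flush_eq (out : List String) (cur : List Char) :
    pvFlush out cur = out ++ pvEmitAll [cur] := by
  have hs : ((cur.dropWhile PySem.Chars.isspace).reverse.dropWhile PySem.Chars.isspace).reverse
      = PySem.Chars.strip cur := rfl
  unfold pvFlush pvEmitAll
  rw [hs]
  by_cases h : PySem.Chars.strip cur = [] <;> simp [h]

-- B's character scan over l, then a final flush, emits exactly the cleaned non-empty
-- segments of (cur ++ l) split at commas (cur is comma-free by construction of the scan).
lemma scan_eq (l : List Char) :
    ∀ (out : List String) (cur : List Char),
      pvFlush
        (l.foldl (fun (p : List String × List Char) ch =>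
            if ch = ',' then (pvFlush p.1 p.2, []) else (p.1, p.2 ++ [ch])) (out, cur)).1
        (l.foldl (fun (p : List String × List Char) ch =>
            if ch = ',' then (pvFlush p.1 p.2, []) else (p.1, p.2 ++ [ch])) (out, cur)).2
        = out ++ pvEmitAll (List.modifyHead (fun t => cur ++ t) (l.splitOn ',')) := by
  induction l with
  | nil =>
    intro out cur
    simp only [List.foldl_nil]
    rw [flush_eq]
    simp [List.splitOn]
  | cons ch rest ih =>
    intro out cur
    simp only [List.foldl_cons]
    by_cases hc : ch = ','
    · subst hc
      simp only [if_true]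
      rw [ih (pvFlush out cur) [], flush_eq]
      simp only [List.splitOn, List.splitOnP_cons, BEq.rfl, if_true]
      rw [List.modifyHead_cons]  -- modifyHead (cur ++ ·) ([] :: segs) = cur :: segs
      simp only [List.append_nil, List.nil_append]
      rw [modifyHead_id']
      show out ++ pvEmitAll [cur] ++ pvEmitAll (List.splitOnP (fun x => x == ',') rest)
          = out ++ pvEmitAll (cur :: List.splitOnP (fun x => x == ',') rest)
      simp [pvEmitAll, List.filter_cons]
      by_cases h : PySem.Chars.strip cur = [] <;> simp [h]
    · simp only [if_neg hc]
      rw [ih out (cur ++ [ch])]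
      have hxc : (ch == ',') = false := by simp [hc]
      simp only [List.splitOn, List.splitOnP_cons, hxc, Bool.false_eq_true, if_false,
        List.modifyHead_modifyHead]
      congr 2
      apply congrFun
      apply congrArg
      funext t
      simp

-- ===== VERDICT =====
theorem parse_csvish_spec : Claim_equal_parse_csvish := by
  intro items _
  unfold Spec_parse_csvish parse_csvish parse_csvish_alt
  cases items with
  | none => rfl
  | some xs =>
    by_cases hxs : xs = []
    · simp [hxs]
    · simp only [hxs, if_false]
      apply PySem.List.foldl_congr_mem xs _ _ []
      intro out item _
      rw [show (PySem.Chars.splitOn item.toList [',']).foldl (fun out part =>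
            let cleaned := PySem.Chars.strip part
            if cleaned ≠ [] then out ++ [String.ofList cleaned] else out) out
          = out ++ pvEmitAll (item.toList.splitOn ',') by
        rw [pySplitOn_single]; exact inner_loop _ out]
      unfold pvScanItem
      have h := scan_eq item.toList out []
      simpa [modifyHead_id'] using h.symm
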